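-- pv_equiv track=rewrite | github.com/ajmeraayam/Poker-Hand-Sorter | CompareHands.py | _checkPair
-- ===== SOURCE A (Python) =====
-- def _checkPair(hand):
--     seen = set()
--     seen_twice = set()
--
--     # For all the cards in the hand
--     for num, suit in hand:
--         # If a number is already seen before then it has repeated and we put it in seen_twice set
--         if num in seen:
--             seen_twice.add(num)
--         # If a number was seen for first time then it is added to the seen set
--         else:
--             seen.add(num)
--
--     # Convert the set to list and return
--     return sorted(list(seen_twice), reverse=True)
-- ===== SOURCE B (Python) =====
-- def _checkPair(hand):
--     # Sort all card numbers descending, then one scan over adjacent positions: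
--     # emit a value at the LAST adjacent equal pair of its run (so once per run >= 2).
--     nums = sorted((num for num, _suit in hand), reverse=True)
--     out = []
--     i = 0
--     while i + 1 < len(nums):
--         if nums[i] == nums[i + 1] and (i + 2 == len(nums) or nums[i + 1] != nums[i + 2]):
--             out.append(nums[i])
--         i += 1
--     return out
-- ===== Notes on version B (the rewrite author's own statement) =====
-- stated objective: alternative
-- what changed: Replaces A's hash-set duplicate detection (seen/seen_twice sets then sorting the duplicates) with sort-then-scan: sort all card numbers descending first, then a single adjacent-pair scan that emits each value at the last equal pair of its run, so the output is built already in order with no sets at all.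
import Mathlib
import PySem

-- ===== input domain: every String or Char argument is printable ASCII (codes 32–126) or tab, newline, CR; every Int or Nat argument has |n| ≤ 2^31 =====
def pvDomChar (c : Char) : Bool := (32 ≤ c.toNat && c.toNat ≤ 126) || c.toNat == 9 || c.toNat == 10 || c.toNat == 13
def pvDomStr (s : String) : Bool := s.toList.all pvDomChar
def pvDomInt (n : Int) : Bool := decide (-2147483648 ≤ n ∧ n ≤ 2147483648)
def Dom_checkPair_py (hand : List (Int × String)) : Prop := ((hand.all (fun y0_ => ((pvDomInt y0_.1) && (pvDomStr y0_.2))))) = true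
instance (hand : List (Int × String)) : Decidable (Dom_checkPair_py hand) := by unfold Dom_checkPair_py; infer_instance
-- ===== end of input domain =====

-- B replaces A's seen/seen-twice hash sets with sort-then-scan: sort all numbers
-- descending, then one adjacent-pair scan emitting each value at the last equal
-- pair of its run (alternative algorithm, same O(n log n) cost).

-- ===== PORT A =====
def checkPair_py (hand : List (Int × String)) : List Int :=
  let st := hand.foldl
    (fun (st : PySem.Set Int × PySem.Set Int) c =>
      if PySem.Set.contains st.1 c.1 then (st.1, PySem.Set.add st.2 c.1)
      else (PySem.Set.add st.1 c.1, st.2))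
    (PySem.Set.empty, PySem.Set.empty)
  PySem.List.sorted st.2 (fun x => x) true

-- ===== PORT B =====
-- B's while-loop over adjacent positions of the sorted list, as structural
-- recursion on the remaining suffix (nums[i] = a, nums[i+1] = b, nums[i+2] = c).
def pvScanRuns : List Int → List Int
  | a :: b :: c :: rest =>
      if a = b ∧ ¬ b = c then a :: pvScanRuns (b :: c :: rest)
      else pvScanRuns (b :: c :: rest)
  | [a, b] => if a = b then [a] else []
  | _ => []

def checkPair_py_alt (hand : List (Int × String)) : List Int :=
  pvScanRuns (PySem.List.sorted (hand.map Prod.fst) (fun x => x) true)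

-- ===== PRECONDITION & SPEC =====
def Spec_checkPair_py (hand : List (Int × String)) (out : List Int) : Prop := out = checkPair_py_alt hand
instance (hand : List (Int × String)) (out : List Int) : Decidable (Spec_checkPair_py hand out) := by unfold Spec_checkPair_py; infer_instance

-- ===== CLAIM =====
def Claim_equal_checkPair_py : Prop := ∀ (hand : List (Int × String)), Dom_checkPair_py hand → Spec_checkPair_py hand (checkPair_py hand)

-- ===== LEMMAS AND PROOFS =====

-- A's loop, as a standalone step function (definitionally the one in checkPair_py)
def pvStepA (st : PySem.Set Int × PySem.Set Int) (c : Int × String) :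
    PySem.Set Int × PySem.Set Int :=
  if PySem.Set.contains st.1 c.1 then (st.1, PySem.Set.add st.2 c.1)
  else (PySem.Set.add st.1 c.1, st.2)

-- membership in A's seen_twice set after the loop
lemma pvMemSnd (l : List (Int × String)) (s t : PySem.Set Int) (x : Int) :
    x ∈ (l.foldl pvStepA (s, t)).2 ↔
      x ∈ t ∨ (x ∈ s ∧ x ∈ l.map Prod.fst) ∨ 2 ≤ (l.map Prod.fst).count x := by
  induction l generalizing s t with
  | nil => simp
  | cons c rest ih =>
    simp only [List.foldl_cons, pvStepA]
    have hm : x ∈ rest.map Prod.fst ↔ 1 ≤ (rest.map Prod.fst).count x :=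
      List.one_le_count_iff.symm
    split_ifs with h <;> rw [ih] <;> rw [PySem.Set.contains_iff] at h <;>
      simp only [PySem.Set.mem_add, List.map_cons, List.mem_cons, List.count_cons] <;>
      by_cases hx : x = c.1
    · subst hx
      simp [h]
    · simp [hx, show ¬ c.1 = x from fun hh => hx hh.symm]
    · subst hx
      simp only [show c.1 ∈ List.map Prod.fst rest ↔
          1 ≤ List.count c.1 (List.map Prod.fst rest) from List.one_le_count_iff.symm] at *
      simp [h]
      by_cases ht' : c.1 ∈ t
      · simp [ht']
      · simp only [ht', false_or]
        constructor
        · rintro (he | hc)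
          · exact he
          · simpa using (List.one_le_count_iff.mp (by omega) :
              c.1 ∈ List.map Prod.fst rest)
        · exact fun he => Or.inl he
    · simp [hx, show ¬ c.1 = x from fun hh => hx hh.symm]

-- both components stay Nodup through A's loop
lemma pvNodup (l : List (Int × String)) (s t : PySem.Set Int)
    (hs : s.Nodup) (ht : t.Nodup) :
    (l.foldl pvStepA (s, t)).1.Nodup ∧ (l.foldl pvStepA (s, t)).2.Nodup := by
  induction l generalizing s t with
  | nil => exact ⟨hs, ht⟩
  | cons c rest ih =>
    simp only [List.foldl_cons, pvStepA]
    split_ifs with h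
    · exact ih s (PySem.Set.add t c.1) hs (PySem.Set.nodup_add t c.1 ht)
    · exact ih (PySem.Set.add s c.1) t (PySem.Set.nodup_add s c.1 hs) ht

-- on a descending list, membership in the scan is exactly "count >= 2"
lemma pvScanMem (l : List Int) (hl : l.Pairwise (fun a b => b ≤ a)) (x : Int) :
    x ∈ pvScanRuns l ↔ 2 ≤ l.count x := by
  induction l with
  | nil => simp [pvScanRuns]
  | cons a t ih =>
    match t with
    | [] =>
      by_cases hx : a = x <;> simp [pvScanRuns, hx]
    | [b] =>
      have hab : b ≤ a := (List.pairwise_cons.mp hl).1 b (by simp)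
      by_cases h1 : a = b
      · subst h1
        simp only [pvScanRuns]
        by_cases hx : a = x
        · simp [hx]
        · have hxa : ¬ x = a := fun h => hx h.symm
          simp [hx, hxa]
      · have hcnt : List.count x [a, b] ≤ 1 := by
          by_cases hx : a = x <;> by_cases hy : b = x
          · exact absurd (hx.trans hy.symm) h1
          all_goals simp [hx, hy]
        simp only [pvScanRuns, if_neg h1, List.not_mem_nil, false_iff]
        omega
    | b :: c :: rest =>
      have hpc := List.pairwise_cons.mp hl
      have htail := hpc.2
      have hpc2 := List.pairwise_cons.mp htail
      have ih' := ih htail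
      have hab : b ≤ a := hpc.1 b (by simp)
      by_cases h1 : a = b
      · by_cases h2 : b = c
        · have hcond : ¬ (a = b ∧ ¬ b = c) := by tauto
          simp only [pvScanRuns, if_neg hcond, ih']
          subst h1; subst h2
          by_cases hx : a = x <;> simp [hx]
        · have hcond : a = b ∧ ¬ b = c := ⟨h1, h2⟩
          simp only [pvScanRuns, if_pos hcond, List.mem_cons, ih']
          subst h1
          by_cases hx : x = a
          · subst hx; simp [List.count_cons]
          · have hax : ¬ a = x := fun h => hx h.symm
            simp [hx, List.count_cons, hax]
      · have hblt : b < a := lt_of_le_of_ne hab (fun h => h1 h.symm)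
        have hnot : a ∉ (b :: c :: rest) := by
          intro hmem
          rcases List.mem_cons.mp hmem with h | h
          · exact h1 h
          · exact absurd (hpc2.1 a h) (by omega)
        have hcond : ¬ (a = b ∧ ¬ b = c) := by tauto
        simp only [pvScanRuns, if_neg hcond, ih']
        by_cases hx : x = a
        · subst hx
          have hc0 : (b :: c :: rest).count x = 0 := List.count_eq_zero.mpr hnot
          simp [hc0]  -- count in tail is zero
        · have hax : ¬ a = x := fun h => hx h.symm
          simp [List.count_cons, hax]

lemma pvScanPairwise (l : List Int) (hl : l.Pairwise (fun a b => b ≤ a)) :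
    (pvScanRuns l).Pairwise (fun p q => q < p) := by
  induction l with
  | nil => simp [pvScanRuns]
  | cons a t ih =>
    match t with
    | [] => simp [pvScanRuns]
    | [b] =>
      by_cases h1 : a = b <;> simp [pvScanRuns, h1]
    | b :: c :: rest =>
      have hpc := List.pairwise_cons.mp hl
      have htail := hpc.2
      have hpc2 := List.pairwise_cons.mp htail
      have ih' := ih htail
      by_cases hcond : a = b ∧ ¬ b = c
      · obtain ⟨h1, h2⟩ := hcond
        have hcb : c < b := lt_of_le_of_ne (hpc2.1 c (by simp)) (fun h => h2 h.symm)
        have hlow : ∀ y ∈ c :: rest, y < b := by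
          intro y hy
          rcases List.mem_cons.mp hy with h | h
          · omega
          · have := (List.pairwise_cons.mp hpc2.2).1 y h
            omega
        simp only [pvScanRuns, if_pos (show a = b ∧ ¬ b = c from ⟨h1, h2⟩)]
        refine List.pairwise_cons.mpr ⟨?_, ih'⟩
        intro x hx
        have hcnt := (pvScanMem _ htail x).mp hx
        have hxm : x ∈ b :: c :: rest := List.one_le_count_iff.mp (by omega)
        have hxb : x ≠ b := by
          intro h; subst h
          have hc0 : (c :: rest).count x = 0 :=
            List.count_eq_zero.mpr (fun hm => absurd (hlow x hm) (by omega))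
          simp [hc0] at hcnt
        have hxcr : x ∈ c :: rest := by
          rcases List.mem_cons.mp hxm with h | h
          · exact absurd h hxb
          · exact h
        have := hlow x hxcr
        omega
      · simp only [pvScanRuns, if_neg hcond]
        exact ih'

theorem pvMain (hand : List (Int × String)) :
    checkPair_py hand = checkPair_py_alt hand := by
  unfold checkPair_py checkPair_py_alt
  simp only []
  set nums := hand.map Prod.fst with hnums
  set tA : PySem.Set Int :=
      (hand.foldl (fun (st : PySem.Set Int × PySem.Set Int) c =>
        if PySem.Set.contains st.1 c.1 then (st.1, PySem.Set.add st.2 c.1)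
        else (PySem.Set.add st.1 c.1, st.2)) (PySem.Set.empty, PySem.Set.empty)).2
    with htA
  set s : List Int := PySem.List.sorted nums (fun x => x) true with hs
  have hfold : tA = (hand.foldl pvStepA (PySem.Set.empty, PySem.Set.empty)).2 := rfl
  have hmemA : ∀ x : Int, x ∈ tA ↔ 2 ≤ nums.count x := by
    intro x
    rw [hfold, pvMemSnd]
    simp [PySem.Set.empty, hnums]
  have hndA : tA.Nodup := by
    rw [hfold]
    exact (pvNodup hand PySem.Set.empty PySem.Set.empty List.nodup_nil List.nodup_nil).2
  have hsp : s.Pairwise (fun a b : Int => b ≤ a) :=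
    PySem.List.sorted_pairwise_rev nums (fun x => x)
  have hsperm : s.Perm nums := PySem.List.sorted_perm nums (fun x => x) true
  have hscnt : ∀ x : Int, s.count x = nums.count x := fun x => hsperm.count_eq x
  -- B's result is strictly descending with membership "count >= 2"
  have hBmem : ∀ x : Int, x ∈ pvScanRuns s ↔ 2 ≤ nums.count x := by
    intro x
    rw [pvScanMem s hsp x, hscnt]
  have hBpw : (pvScanRuns s).Pairwise (fun p q : Int => q < p) := pvScanPairwise s hsp
  have hBnd : (pvScanRuns s).Nodup := hBpw.imp (fun h => (ne_of_lt h).symm)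
  have hperm : (pvScanRuns s).Perm tA := by
    rw [List.perm_ext_iff_of_nodup hBnd hndA]
    intro x
    rw [hBmem, hmemA]
  exact PySem.List.sorted_rev_eq_of_perm_of_pairwise_gt tA _ (fun x => x) hperm hBpw

-- ===== VERDICT =====
theorem checkPair_py_spec : Claim_equal_checkPair_py := by
  intro hand _
  unfold Spec_checkPair_py
  exact pvMain hand
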